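-- pv_equiv track=rewrite | github.com/Roslofe/advent-of-code | 2023/day5/seed_location.py | attribute_mappings
-- ===== SOURCE A (Python) =====
-- def attribute_mappings(lines):
--     # gather the mappings in each attribute
--     map_groups = []
--     # destination, source, range
--     current_ranges = []
--     for line in lines[2:]:
--         if line == "":
--             map_groups.append(current_ranges)
--             current_ranges = []
--         elif line.split()[0].isnumeric():
--             split_line = tuple(map(lambda n: int(n), line.split()))
--             current_ranges.append(split_line)
--     map_groups.append(current_ranges)
--     return map_groups
-- ===== SOURCE B (Python) =====
-- def _parse(block):
--     return [tuple(int(n) for n in l.split()) for l in block if l.split()[0].isnumeric()]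
--
--
-- def _blocks(ls):
--     # Recursive divide-and-conquer on the first blank line: cut the list at
--     # the first "", parse the prefix as one block, recurse on the rest.
--     if "" in ls:
--         i = ls.index("")
--         return [_parse(ls[:i])] + _blocks(ls[i + 1:])
--     return [_parse(ls)]
--
--
-- def attribute_mappings(lines):
--     return _blocks(lines[2:])
-- ===== Notes on version B (the rewrite author's own statement) =====
-- stated objective: alternative
-- what changed: Replaces A's single pass with an inline flush-on-blank accumulator by recursive divide-and-conquer: find the first blank line with index(), slice the list there, parse the prefix block, and recurse on the suffix.
import Mathlib
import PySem

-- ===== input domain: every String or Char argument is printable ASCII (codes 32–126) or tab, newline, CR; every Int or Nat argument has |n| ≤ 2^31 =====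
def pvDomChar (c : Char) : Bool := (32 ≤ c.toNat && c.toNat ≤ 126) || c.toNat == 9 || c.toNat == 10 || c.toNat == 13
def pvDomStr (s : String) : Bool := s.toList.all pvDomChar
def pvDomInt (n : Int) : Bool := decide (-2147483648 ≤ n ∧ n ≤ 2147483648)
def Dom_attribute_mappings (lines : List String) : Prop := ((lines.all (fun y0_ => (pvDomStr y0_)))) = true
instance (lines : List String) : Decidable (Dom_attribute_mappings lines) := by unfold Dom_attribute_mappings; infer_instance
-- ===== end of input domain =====

-- B replaces A's single-pass flush-on-blank accumulator by recursive divide-and-conquer: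
-- cut at the first blank line (index + slices), parse the prefix, recurse on the suffix.
-- Return values proved equal; no speed claim.

-- ===== PORT A =====
def attribute_mappings (lines : List String) : List (List (List Int)) :=
  let r := (PySem.List.slice lines (some 2) none).foldl
    (fun (st : List (List (List Int)) × List (List Int)) (line : String) =>
      if line = "" then (st.1 ++ [st.2], ([] : List (List Int)))
      else if PySem.Str.strIsdigit ((PySem.Str.split₀ line).headD "") then
        (st.1, st.2 ++ [(PySem.Str.split₀ line).map (fun n => (PySem.Int.ofStr? n).getD 0)])
      else st)
    ([], [])
  r.1 ++ [r.2]

-- ===== PORT B =====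
-- _parse(block)
def pvParse (block : List String) : List (List Int) :=
  (block.filter (fun l => PySem.Str.strIsdigit ((PySem.Str.split₀ l).headD ""))).map
    (fun l => (PySem.Str.split₀ l).map (fun n => (PySem.Int.ofStr? n).getD 0))

-- _blocks(ls): recursion on the first blank line
def pvBlocks (ls : List String) : List (List (List Int)) :=
  if h : "" ∈ ls then
    let i := (PySem.List.index? ls "").getD 0
    [pvParse (PySem.List.slice ls none (some (i : Int)))] ++
      pvBlocks (PySem.List.slice ls (some ((i : Int) + 1)) none)
  else [pvParse ls]
termination_by ls.length
decreasing_by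
  obtain ⟨k, hk⟩ := Option.isSome_iff_exists.mp ((PySem.List.index?_isSome_iff ls "").mpr h)
  obtain ⟨hklt, -⟩ := PySem.List.getElem_of_index?_eq_some hk
  have : ((k : Int) + 1) = (((k + 1 : Nat) : Int)) := by push_cast; ring
  simp only [hk, Option.getD_some, this, PySem.List.slice_from_natCast, List.length_drop]
  omega

def attribute_mappings_alt (lines : List String) : List (List (List Int)) :=
  pvBlocks (PySem.List.slice lines (some 2) none)

-- ===== PRECONDITION & SPEC =====
-- Pre_ excludes exactly the inputs on which the Python A raises: a whitespace-only
-- non-empty line after the first two (IndexError on split()[0]) and a line whose first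
-- token is numeric but some later token is not a valid int literal (ValueError).
def Pre_attribute_mappings (lines : List String) : Prop :=
  ∀ l ∈ lines.drop 2, l ≠ "" →
    (PySem.Str.split₀ l ≠ [] ∧
     (PySem.Str.strIsdigit ((PySem.Str.split₀ l).headD "") = true →
      ∀ t ∈ PySem.Str.split₀ l, (PySem.Int.ofStr? t).isSome = true))
instance (lines : List String) : Decidable (Pre_attribute_mappings lines) := by
  unfold Pre_attribute_mappings; infer_instance
def pvWitness_attribute_mappings : List String :=
  ["seeds: 1 2", "", "a-to-b map:", "50 98 2", "", "x y", "52 50 48"]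
def Spec_attribute_mappings (lines : List String) (out : List (List (List Int))) : Prop := out = attribute_mappings_alt lines
instance (lines : List String) (out : List (List (List Int))) : Decidable (Spec_attribute_mappings lines out) := by unfold Spec_attribute_mappings; infer_instance

-- ===== CLAIM (what is proved, stated in full; the proofs are below) =====
def Claim_equal_attribute_mappings : Prop := ∀ (lines : List String), Dom_attribute_mappings lines → Pre_attribute_mappings lines → Spec_attribute_mappings lines (attribute_mappings lines)

-- ===== LEMMAS AND PROOFS =====

-- named copy of A's loop body (definitionally equal to the lambda in the port)
def pvStepA (st : List (List (List Int)) × List (List Int)) (line : String) :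
    List (List (List Int)) × List (List Int) :=
  if line = "" then (st.1 ++ [st.2], ([] : List (List Int)))
  else if PySem.Str.strIsdigit ((PySem.Str.split₀ line).headD "") then
    (st.1, st.2 ++ [(PySem.Str.split₀ line).map (fun n => (PySem.Int.ofStr? n).getD 0)])
  else st

lemma pvParse_nil : pvParse [] = [] := by simp [pvParse]

lemma pvParse_append (b : List String) (line : String) :
    pvParse (b ++ [line]) =
      pvParse b ++ (if PySem.Str.strIsdigit ((PySem.Str.split₀ line).headD "")
        then [(PySem.Str.split₀ line).map (fun n => (PySem.Int.ofStr? n).getD 0)] else []) := by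
  by_cases h : PySem.Str.strIsdigit ((PySem.Str.split₀ line).headD "") = true
  all_goals simp only [Bool.not_eq_true] at h
  all_goals simp only [PySem.Str.strIsdigit_eq, List.headD_eq_head?_getD] at h
  · simp [pvParse, h]
  · simp [pvParse, h]

lemma pvBlocks_no_blank (b : List String) (hb : "" ∉ b) : pvBlocks b = [pvParse b] := by
  rw [pvBlocks.eq_def, dif_neg hb]

lemma pvBlocks_split (b rest : List String) (hb : "" ∉ b) :
    pvBlocks (b ++ "" :: rest) = pvParse b :: pvBlocks rest := by
  rw [pvBlocks.eq_def, dif_pos (by simp)]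
  have hs : PySem.List.index? (b ++ "" :: rest) "" = some b.length := by
    have : b ++ "" :: rest = (b ++ [""]) ++ rest := by simp
    rw [this, PySem.List.index?_append_of_mem _ (by simp),
        PySem.List.index?_append_singleton_self _ _ hb]
  have hcast : ((b.length : Int) + 1) = (((b.length + 1 : Nat) : Int)) := by push_cast; ring
  simp only [hs, Option.getD_some, hcast, PySem.List.slice_to_natCast,
    PySem.List.slice_from_natCast]
  have hdrop : (b ++ "" :: rest).drop (b.length + 1) = rest := by
    rw [show b.length + 1 = b.length + 1 from rfl, ← List.drop_drop, List.drop_left]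
    rfl
  rw [List.take_left, hdrop]
  simp

lemma pvMain (l : List String) (gs : List (List (List Int))) (b : List String)
    (hb : "" ∉ b) :
    (l.foldl pvStepA (gs, pvParse b)).1 ++ [(l.foldl pvStepA (gs, pvParse b)).2] =
      gs ++ pvBlocks (b ++ l) := by
  induction l generalizing gs b with
  | nil => simp [pvBlocks_no_blank b hb]
  | cons line rest ih =>
    simp only [List.foldl_cons]
    by_cases h : line = ""
    · subst h
      rw [show pvStepA (gs, pvParse b) "" = (gs ++ [pvParse b], pvParse []) by
            simp [pvStepA, pvParse_nil],
          ih (gs ++ [pvParse b]) [] (by simp), pvBlocks_split b rest hb]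
      simp
    · have hstep : pvStepA (gs, pvParse b) line = (gs, pvParse (b ++ [line])) := by
        rw [pvParse_append]
        by_cases hn : PySem.Str.strIsdigit ((PySem.Str.split₀ line).headD "") = true
        all_goals simp only [Bool.not_eq_true] at hn
        all_goals simp only [PySem.Str.strIsdigit_eq, List.headD_eq_head?_getD] at hn
        · simp [pvStepA, h, hn]
        · simp [pvStepA, h, hn]
      rw [hstep, ih gs (b ++ [line]) (by simp [hb, Ne.symm h])]
      simp

-- ===== VERDICT (by name: the statement is the Claim_ definition above) =====
theorem attribute_mappings_spec : Claim_equal_attribute_mappings := by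
  intro lines _ _
  show attribute_mappings lines = attribute_mappings_alt lines
  unfold attribute_mappings attribute_mappings_alt
  have := pvMain (PySem.List.slice lines (some 2) none) [] [] (by simp)
  simp only [List.nil_append] at this
  exact this
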